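-- pv_equiv track=rewrite | github.com/GerardoRopero/AFD_QUIZ_24-02 | main.py | afd
-- ===== SOURCE A (Python) =====
-- def afd(cadena):
--     estado = "q0"
--
--     for c in cadena:
--         if estado == "q0":
--             if c == "+":
--                 estado = "q1"
--             elif c.isupper():
--                 estado = "q3"
--             else:
--                 return "NO ACEPTA"
--
--         elif estado == "q1":
--             if c == "+":
--                 estado = "q2"
--             else:
--                 return "NO ACEPTA"
--
--         elif estado == "q2":
--             return "NO ACEPTA"
--
--         elif estado == "q3":
--             if c.islower() or c.isdigit():
--                 estado = "q4"
--             else: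
--                 return "NO ACEPTA"
--
--         elif estado == "q4":
--             if c.islower() or c.isdigit():
--                 estado = "q4"
--             else:
--                 return "NO ACEPTA"
--
--     # Estados finales
--     if estado == "q1":
--         return "SUMA"
--     elif estado == "q2":
--         return "INCR"
--     elif estado == "q3" or estado == "q4":
--         return "ID"
--     else:
--         return "NO ACEPTA"
-- ===== SOURCE B (Python) =====
-- def afd(cadena):
--     if cadena == "+":
--         return "SUMA"
--     if cadena == "++":
--         return "INCR"
--     if cadena and cadena[0].isupper() and all(ch.islower() or ch.isdigit() for ch in cadena[1:]):
--         return "ID"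
--     return "NO ACEPTA"
-- ===== Notes on version B (the rewrite author's own statement) =====
-- stated objective: simpler
-- what changed: Replaces the explicit five-state DFA loop with a direct shape classification: two literal comparisons for '+'/'++' and a single 'first char uppercase, rest lowercase-or-digit' test for ID.
import Mathlib
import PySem

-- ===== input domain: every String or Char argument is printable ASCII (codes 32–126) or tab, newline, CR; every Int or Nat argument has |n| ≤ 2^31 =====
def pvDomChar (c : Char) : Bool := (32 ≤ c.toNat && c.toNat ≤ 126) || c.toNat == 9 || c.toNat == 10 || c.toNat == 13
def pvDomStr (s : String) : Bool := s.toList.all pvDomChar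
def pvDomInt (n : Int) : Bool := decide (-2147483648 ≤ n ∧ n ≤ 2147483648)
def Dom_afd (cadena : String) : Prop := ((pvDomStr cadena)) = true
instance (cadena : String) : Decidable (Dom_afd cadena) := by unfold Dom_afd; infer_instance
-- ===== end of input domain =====

-- B replaces A's five-state DFA loop with a direct shape classification (simpler).

-- ===== PORT A =====
-- literal transliteration of A's for-loop: the loop body becomes structural
-- recursion over the remaining characters carrying the state string `estado`;
-- the empty-list case is the post-loop "Estados finales" chain.
def afdLoop (estado : String) (cs : List Char) : String :=
  match cs with
  | [] =>
    if estado = "q1" then "SUMA"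
    else if estado = "q2" then "INCR"
    else if estado = "q3" ∨ estado = "q4" then "ID"
    else "NO ACEPTA"
  | c :: rest =>
    if estado = "q0" then
      if c = '+' then afdLoop "q1" rest
      else if PySem.Chars.isupper c then afdLoop "q3" rest
      else "NO ACEPTA"
    else if estado = "q1" then
      if c = '+' then afdLoop "q2" rest
      else "NO ACEPTA"
    else if estado = "q2" then "NO ACEPTA"
    else if estado = "q3" then
      if PySem.Chars.islower c || PySem.Chars.isdigit c then afdLoop "q4" rest
      else "NO ACEPTA"
    else if estado = "q4" then
      if PySem.Chars.islower c || PySem.Chars.isdigit c then afdLoop "q4" rest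
      else "NO ACEPTA"
    else afdLoop estado rest  -- no branch matched: Python's for-loop just advances

def afd (cadena : String) : String := afdLoop "q0" cadena.toList

-- ===== PORT B =====
def afd_alt (cadena : String) : String :=
  if cadena = "+" then "SUMA"
  else if cadena = "++" then "INCR"
  else
    match cadena.toList with          -- `cadena and cadena[0] … cadena[1:]`
    | [] => "NO ACEPTA"
    | c :: rest =>
      if PySem.Chars.isupper c
          && rest.all (fun ch => PySem.Chars.islower ch || PySem.Chars.isdigit ch)
      then "ID" else "NO ACEPTA"

-- ===== PRECONDITION & SPEC =====
def Spec_afd (cadena : String) (out : String) : Prop := out = afd_alt cadena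
instance (cadena : String) (out : String) : Decidable (Spec_afd cadena out) := by unfold Spec_afd; infer_instance

-- ===== CLAIM (what is proved, stated in full; the proofs are below) =====
def Claim_equal_afd : Prop := ∀ (cadena : String), Dom_afd cadena → Spec_afd cadena (afd cadena)

-- ===== LEMMAS AND PROOFS =====

-- in state q4 the loop accepts exactly the lower-or-digit strings
theorem afdLoop_q4 (cs : List Char) :
    afdLoop "q4" cs =
      if cs.all (fun ch => PySem.Chars.islower ch || PySem.Chars.isdigit ch)
      then "ID" else "NO ACEPTA" := by
  induction cs with
  | nil => simp [afdLoop]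
  | cons c rest ih =>
    simp only [afdLoop, List.all_cons]
    by_cases h : (PySem.Chars.islower c || PySem.Chars.isdigit c) = true
    · simp [h, ih]
    · simp [h]

-- state q3 behaves like q4
theorem afdLoop_q3 (cs : List Char) :
    afdLoop "q3" cs =
      if cs.all (fun ch => PySem.Chars.islower ch || PySem.Chars.isdigit ch)
      then "ID" else "NO ACEPTA" := by
  cases cs with
  | nil => simp [afdLoop]
  | cons c rest =>
    simp only [afdLoop, List.all_cons]
    by_cases h : (PySem.Chars.islower c || PySem.Chars.isdigit c) = true
    · simp [h, afdLoop_q4]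
    · simp [h]

theorem str_eq_iff_toList (s t : String) : s = t ↔ s.toList = t.toList :=
  String.toList_inj.symm

-- ===== VERDICT (by name: the statement is the Claim_ definition above) =====
theorem afd_spec : Claim_equal_afd := by
  intro cadena _
  show afd cadena = afd_alt cadena
  unfold afd afd_alt
  simp only [str_eq_iff_toList cadena "+", str_eq_iff_toList cadena "++"]
  cases h : cadena.toList with
  | nil => simp [afdLoop]
  | cons c rest =>
    by_cases hc : c = '+'
    · subst hc
      cases rest with
      | nil => simp [afdLoop]
      | cons c2 rest2 =>
        by_cases hc2 : c2 = '+'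
        · subst hc2
          cases rest2 with
          | nil => simp [afdLoop]
          | cons c3 rest3 =>
            have hup : PySem.Chars.isupper '+' = false := by decide
            simp [afdLoop, hup]
        · have : PySem.Chars.isupper '+' = false := by decide
          simp [afdLoop, hc2, this]
    · by_cases hu : PySem.Chars.isupper c = true
      · simp only [afdLoop, hc, if_false, hu, if_true]
        rw [afdLoop_q3]
        have h2 : ¬ (c :: rest = ['+']) := by simp [hc]
        have h3 : ¬ (c :: rest = ['+', '+']) := by simp [hc]
        simp only [show ("+" : String).toList = ['+'] from rfl,
          show ("++" : String).toList = ['+', '+'] from rfl, h2, h3,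
          if_false, Bool.true_and]
      · have h2 : ¬ (c :: rest = ['+']) := by simp [hc]
        have h3 : ¬ (c :: rest = ['+', '+']) := by simp [hc]
        simp [afdLoop, hc, hu,
          show ("+" : String).toList = ['+'] from rfl,
          show ("++" : String).toList = ['+', '+'] from rfl, h2, h3]
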